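-- pv_equiv track=rewrite | github.com/Araque08/BasesNumericas | Conversor.py | decimal_a_base14
-- ===== SOURCE A (Python) =====
-- def decimal_a_base14(decimal):
--     base14 = ""
--     while decimal > 0:
--         residuo = decimal % 14
--         verdadero_caracter = obtener_caracter_hexadecimal(residuo)
--         base14 = verdadero_caracter + base14
--         decimal = int(decimal / 14)
--     return base14
--
-- def obtener_caracter_hexadecimal(valor):
--
--     valor = str(valor)
--     equivalencias = {
--         "10": "a",
--         "11": "b",
--         "12": "c",
--         "13": "d",
--         "14": "e",
--     }
--     if valor in equivalencias:
--         return equivalencias[valor]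
--     else:
--         return valor
-- ===== SOURCE B (Python) =====
-- _DIGITS = "0123456789abcde"
--
-- def decimal_a_base14(decimal):
--     if decimal <= 0:
--         return ""
--     return decimal_a_base14(int(decimal / 14)) + _DIGITS[decimal % 14]
-- ===== Notes on version B (the rewrite author's own statement) =====
-- stated objective: simpler
-- what changed: Replaces the while-loop with accumulator and the str()+dict digit helper by a two-line recursion on the quotient that indexes a digit-string literal, assembling the result as calls unwind.
import Mathlib
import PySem

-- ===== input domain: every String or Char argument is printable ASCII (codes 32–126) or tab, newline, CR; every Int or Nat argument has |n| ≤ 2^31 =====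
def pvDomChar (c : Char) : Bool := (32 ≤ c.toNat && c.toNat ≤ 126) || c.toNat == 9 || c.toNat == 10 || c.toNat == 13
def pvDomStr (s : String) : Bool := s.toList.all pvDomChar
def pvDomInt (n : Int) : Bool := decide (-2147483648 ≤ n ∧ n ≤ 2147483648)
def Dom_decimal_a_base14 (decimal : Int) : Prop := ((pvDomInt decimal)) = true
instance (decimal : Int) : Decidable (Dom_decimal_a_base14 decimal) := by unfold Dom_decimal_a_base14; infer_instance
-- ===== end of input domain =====

-- B replaces A's while-loop + str()/dict digit helper by a two-line recursion on the
-- quotient that indexes a digit string; objective: simpler, same cost.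

-- ===== PORT A =====
-- Strings are ported through List Char (PySem convention); the final result is String.ofList.
def obtener_caracter_hexadecimal (valor : Int) : List Char :=
  let valor' := PySem.Int.toChars valor
  let equivalencias : PySem.Dict (List Char) (List Char) :=
    PySem.Dict.ofList [(['1','0'], ['a']), (['1','1'], ['b']), (['1','2'], ['c']),
                       (['1','3'], ['d']), (['1','4'], ['e'])]
  match PySem.Dict.get? equivalencias valor' with
  | some s => s
  | none => valor'

-- A's while-loop. Python's `int(decimal / 14)` (float division) equals `decimal // 14`
-- for every positive decimal in Dom (|n| ≤ 2^31 < 2^53: the float quotient k - j/14 is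
-- at least 1/14 from any integer, far beyond rounding error), so it is ported exactly
-- as PySem.Int.floordiv on the admitted domain.
def decimal_a_base14_go (decimal : Int) (base14 : List Char) : List Char :=
  if decimal > 0 then
    decimal_a_base14_go (PySem.Int.floordiv decimal 14)
      (obtener_caracter_hexadecimal (PySem.Int.mod decimal 14) ++ base14)
  else
    base14
termination_by decimal.toNat
decreasing_by
  rw [PySem.Int.floordiv_eq_ediv_of_pos (by norm_num : (0:Int) < 14)]
  omega

def decimal_a_base14 (decimal : Int) : String :=
  String.ofList (decimal_a_base14_go decimal [])

-- ===== PORT B =====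
def pvDigits : List Char := ['0','1','2','3','4','5','6','7','8','9','a','b','c','d','e']

-- Source B's recursion; _DIGITS[decimal % 14] is indexing with a residue always in 0..13,
-- ported with pyGetD (the default is never reached). int(decimal / 14) → floordiv,
-- exact on Dom as above.
def decimal_a_base14_alt_go (decimal : Int) : List Char :=
  if decimal ≤ 0 then
    []
  else
    decimal_a_base14_alt_go (PySem.Int.floordiv decimal 14) ++
      [PySem.List.pyGetD pvDigits (PySem.Int.mod decimal 14) '?']
termination_by decimal.toNat
decreasing_by
  rw [PySem.Int.floordiv_eq_ediv_of_pos (by norm_num : (0:Int) < 14)]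
  omega

def decimal_a_base14_alt (decimal : Int) : String :=
  String.ofList (decimal_a_base14_alt_go decimal)

-- ===== PRECONDITION & SPEC =====
def Spec_decimal_a_base14 (decimal : Int) (out : String) : Prop := out = decimal_a_base14_alt decimal
instance (decimal : Int) (out : String) : Decidable (Spec_decimal_a_base14 decimal out) := by unfold Spec_decimal_a_base14; infer_instance

-- ===== CLAIM (what is proved, stated in full; the proofs are below) =====
def Claim_equal_decimal_a_base14 : Prop := ∀ (decimal : Int), Dom_decimal_a_base14 decimal → Spec_decimal_a_base14 decimal (decimal_a_base14 decimal)

-- ===== LEMMAS AND PROOFS =====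

-- A's digit helper agrees with B's digit-string indexing on every residue 0..13.
lemma digit_eq (r : Int) (h0 : 0 ≤ r) (h1 : r < 14) :
    obtener_caracter_hexadecimal r = [PySem.List.pyGetD pvDigits r '?'] := by
  interval_cases r <;> decide

-- Loop/recursion bridge: A's accumulator loop prepends exactly what B's recursion appends.
lemma go_eq_alt (decimal : Int) (base14 : List Char) :
    decimal_a_base14_go decimal base14 = decimal_a_base14_alt_go decimal ++ base14 := by
  fun_induction decimal_a_base14_go decimal base14 with
  | case1 d s h ih =>
      rw [decimal_a_base14_alt_go]
      rw [if_neg (by omega : ¬ d ≤ 0)]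
      rw [ih, digit_eq _
        (PySem.Int.mod_nonneg d (by norm_num : (0:Int) < 14))
        (PySem.Int.mod_lt d (by norm_num : (0:Int) < 14))]
      simp
  | case2 d s h =>
      rw [decimal_a_base14_alt_go, if_pos (by omega : d ≤ 0)]
      simp

-- ===== VERDICT (by name: the statement is the Claim_ definition above) =====
theorem decimal_a_base14_spec : Claim_equal_decimal_a_base14 := by
  intro d _
  show decimal_a_base14 d = decimal_a_base14_alt d
  unfold decimal_a_base14 decimal_a_base14_alt
  rw [go_eq_alt, List.append_nil]
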